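-- pv_equiv track=rewrite | github.com/larumbe/challenges | hackerrank/interview/stacksqueues/minmaxriddle.py | riddle
-- ===== SOURCE A (Python) =====
-- def riddle(arr):
--     maxval = []
--     for l in range(1, len(arr)+1):
--         cw = []                 # currentwindow
--         for i in range(len(arr)-l+1):
--             cw.append(min(arr[i:i+l]))
--         maxval.append(max(cw))
--
--     return maxval
-- ===== SOURCE B (Python) =====
-- def riddle(arr):
--     # DP: window minima of size l+1 from size l via min(arr[i], cur[i+1]); O(n^2) vs A's O(n^3)
--     res = []
--     cur = arr[:]
--     while cur:
--         res.append(max(cur))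
--         cur = [min(a, m) for a, m in zip(arr, cur[1:])]
--     return res
-- ===== Notes on version B (the rewrite author's own statement) =====
-- stated objective: faster
-- what changed: Replaces A's triple loop (for every window size, recompute min over each slice) by a dynamic program that keeps the list of current-size window minima and derives the next size via min(arr[i], cur[i+1]), dropping the per-window rescan.
import Mathlib
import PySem

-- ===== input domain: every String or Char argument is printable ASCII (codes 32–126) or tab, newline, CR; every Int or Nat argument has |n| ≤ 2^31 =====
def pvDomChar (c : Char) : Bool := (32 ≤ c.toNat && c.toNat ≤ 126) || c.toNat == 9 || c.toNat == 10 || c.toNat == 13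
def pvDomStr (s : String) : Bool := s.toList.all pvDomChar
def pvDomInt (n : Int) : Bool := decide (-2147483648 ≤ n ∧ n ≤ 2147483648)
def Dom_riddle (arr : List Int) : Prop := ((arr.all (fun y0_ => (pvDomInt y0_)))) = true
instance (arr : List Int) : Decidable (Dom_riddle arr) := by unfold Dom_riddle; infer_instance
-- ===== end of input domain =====

-- B replaces A's per-size rescan of every window by a DP that derives size-(l+1) window
-- minima from the size-l ones (objective: faster, O(n^2) instead of O(n^3)).

-- ===== PORT A =====
-- literal port of A: for every window size l, recompute min over each slice, then take max
def riddle (arr : List Int) : List Int :=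
  (PySem.List.pyRange 1 ((arr.length : Int) + 1) 1).foldl (fun maxval l =>
    let cw := (PySem.List.pyRange 0 ((arr.length : Int) - l + 1) 1).foldl (fun cw i =>
      -- min(arr[i:i+l]): slice is nonempty here, so Python's min never raises; getD 0 is unreachable
      cw ++ [(PySem.List.min? (PySem.List.slice arr (some i) (some (i + l))) (fun x => x)).getD 0]) []
    -- max(cw): cw is nonempty here, getD 0 unreachable
    maxval ++ [(PySem.List.max? cw (fun x => x)).getD 0]) []

-- ===== PORT B =====
-- port of Source B's while-loop: cur holds the window minima of the current size
def riddleAltLoop (arr cur : List Int) : List Int :=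
  match cur with
  | [] => []
  | a :: t =>
    ((PySem.List.max? (a :: t) (fun x => x)).getD 0)
      :: riddleAltLoop arr (List.zipWith min arr t)   -- [min(a, m) for a, m in zip(arr, cur[1:])]
termination_by cur.length
decreasing_by simp [List.length_zipWith]

def riddle_alt (arr : List Int) : List Int := riddleAltLoop arr arr

-- ===== PRECONDITION & SPEC =====
def Spec_riddle (arr : List Int) (out : List Int) : Prop := out = riddle_alt arr
instance (arr : List Int) (out : List Int) : Decidable (Spec_riddle arr out) := by unfold Spec_riddle; infer_instance

-- ===== CLAIM (what is proved, stated in full; the proofs are below) =====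
def Claim_equal_riddle : Prop := ∀ (arr : List Int), Dom_riddle arr → Spec_riddle arr (riddle arr)

-- ===== LEMMAS AND PROOFS =====

-- the DP state after k steps: window minima of size k+1
def pvMins (arr : List Int) (k : Nat) : List Int :=
  (fun cur => List.zipWith min arr cur.tail)^[k] arr

-- the answer for window size k+1
def pvG (arr : List Int) (k : Nat) : Int :=
  (PySem.List.max? (pvMins arr k) (fun x => x)).getD 0

lemma pvMins_succ (arr : List Int) (k : Nat) :
    pvMins arr (k + 1) = List.zipWith min arr (pvMins arr k).tail := by
  unfold pvMins
  rw [Function.iterate_succ_apply']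

lemma length_pvMins (arr : List Int) (k : Nat) :
    (pvMins arr k).length = arr.length - k := by
  induction k with
  | zero => simp [pvMins]
  | succ k ih =>
    rw [pvMins_succ]
    simp [List.length_zipWith, ih]
    omega

lemma foldl_min_min (t : List Int) : ∀ a b : Int,
    t.foldl min (min a b) = min a (t.foldl min b) := by
  induction t with
  | nil => intro a b; simp
  | cons x t ih =>
    intro a b
    simp only [List.foldl_cons]
    rw [min_assoc, ih]

lemma getElem_pvMins (arr : List Int) (k : Nat) : ∀ (i : Nat) (h : i < (pvMins arr k).length),
    (pvMins arr k)[i] =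
      ((arr.drop (i + 1)).take k).foldl min
        (arr[i]'(by have := length_pvMins arr k; omega)) := by
  induction k with
  | zero => intro i h; simp [pvMins]
  | succ k ih =>
    intro i h
    have hlen := length_pvMins arr (k + 1)
    have hi : i + 1 + k < arr.length := by omega
    have h' : i + 1 < (pvMins arr k).length := by
      have := length_pvMins arr k; omega
    simp only [pvMins_succ] at h ⊢
    rw [List.getElem_zipWith, List.getElem_tail]
    rw [ih (i + 1) h']
    have hdrop : arr.drop (i + 1) = arr[i + 1]'(by omega) :: arr.drop (i + 2) := by
      rw [List.drop_eq_getElem_cons (by omega)]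
    rw [hdrop]
    simp only [List.take_succ_cons, List.foldl_cons]
    rw [foldl_min_min]

-- B's loop produces pvG for successive k
lemma riddleAltLoop_eq (arr : List Int) : ∀ (m k : Nat), (pvMins arr k).length = m →
    riddleAltLoop arr (pvMins arr k) = (List.range m).map (fun j => pvG arr (k + j)) := by
  intro m
  induction m with
  | zero =>
    intro k hk
    have h0 : pvMins arr k = [] := List.eq_nil_of_length_eq_zero hk
    rw [h0, riddleAltLoop.eq_def]
    simp
  | succ m ih =>
    intro k hk
    obtain ⟨a, t, hat⟩ : ∃ a t, pvMins arr k = a :: t := by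
      cases hcur : pvMins arr k with
      | nil => rw [hcur] at hk; simp at hk
      | cons a t => exact ⟨a, t, rfl⟩
    have hnext : List.zipWith min arr t = pvMins arr (k + 1) := by
      rw [pvMins_succ, hat]
      rfl
    have hlen1 : (pvMins arr (k + 1)).length = m := by
      have h1 := length_pvMins arr k
      have h2 := length_pvMins arr (k + 1)
      omega
    rw [hat, riddleAltLoop.eq_def]
    simp only
    rw [hnext, ih (k + 1) hlen1]
    rw [List.range_succ_eq_map]
    simp only [List.map_cons, List.map_map]
    refine congrArg₂ List.cons ?_ ?_
    · rw [show a :: t = pvMins arr k from hat.symm]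
      simp [pvG]
    · apply List.map_congr_left
      intro j _
      simp only [Function.comp]
      congr 1
      omega

lemma riddle_alt_eq (arr : List Int) :
    riddle_alt arr = (List.range arr.length).map (fun k => pvG arr k) := by
  have h0 : pvMins arr 0 = arr := rfl
  have h := riddleAltLoop_eq arr arr.length 0 (by simp [length_pvMins])
  rw [h0] at h
  unfold riddle_alt
  rw [h]
  simp

-- A's inner loop for window size 1 + k equals the DP state pvMins arr k
lemma cw_eq (arr : List Int) (k : Nat) (hk : k < arr.length) :
    (PySem.List.pyRange 0 ((arr.length : Int) - (1 + (k : Int)) + 1) 1).foldl (fun cw i =>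
        cw ++ [(PySem.List.min? (PySem.List.slice arr (some i) (some (i + (1 + (k : Int))))) (fun x => x)).getD 0]) []
      = pvMins arr k := by
  rw [PySem.List.foldl_append_singleton_eq_map, List.nil_append]
  have hb : (arr.length : Int) - (1 + (k : Int)) + 1 = ((arr.length - k : Nat) : Int) := by
    omega
  rw [hb]
  apply List.ext_getElem
  · simp [PySem.List.length_pyRange_one, length_pvMins]
  · intro i h1 h2
    rw [List.getElem_map]
    rw [PySem.List.getElem_pyRange_one]
    have hi : i < arr.length - k := by
      have := length_pvMins arr k; omega
    have hz : (0 : Int) + (i : Nat) = ((i : Nat) : Int) := by ring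
    rw [hz]
    have hslice : PySem.List.slice arr (some ((i : Nat) : Int)) (some (((i : Nat) : Int) + (1 + (k : Int)))) =
        (arr.drop i).take (k + 1) := by
      have hc : ((i : Nat) : Int) + (1 + (k : Int)) = ((i : Nat) : Int) + (((k + 1 : Nat)) : Int) := by
        omega
      rw [hc, PySem.List.slice_natCast_add]
    rw [hslice]
    have hdrop : arr.drop i = arr[i]'(by omega) :: arr.drop (i + 1) := by
      rw [List.drop_eq_getElem_cons (by omega)]
    rw [hdrop, List.take_succ_cons, PySem.List.min?_id_cons]
    rw [getElem_pvMins arr k i h2]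
    simp

lemma riddle_eq (arr : List Int) :
    riddle arr = (List.range arr.length).map (fun k => pvG arr k) := by
  unfold riddle
  simp only
  rw [PySem.List.foldl_append_singleton_eq_map, List.nil_append]
  rw [PySem.List.pyRange_one]
  have hn : ((arr.length : Int) + 1 - 1).toNat = arr.length := by omega
  rw [hn, List.map_map]
  apply List.map_congr_left
  intro k hk
  have hk' : k < arr.length := List.mem_range.mp hk
  simp only [Function.comp]
  rw [cw_eq arr k hk']
  rfl

-- ===== VERDICT (by name: the statement is the Claim_ definition above) =====
theorem riddle_spec : Claim_equal_riddle := by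
  intro arr _
  unfold Spec_riddle
  rw [riddle_eq, riddle_alt_eq]
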